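-- pv_equiv track=rewrite | github.com/fast-crypto-lab/Frobenius_AFFT | gf2_poly.py | gf2_poly_div_count
-- ===== SOURCE A (Python) =====
-- def gf2_poly_div_count(a,b):
--     a=strip_zero(a)
--     la = len(a)
--     b=strip_zero(b)
--     lb = len(b)
--     assert lb>0
--     count = 0
--     rm = list(a)
--     ret = []
--     for i in range(la-1,lb-2,-1):
--         if rm[i] == 1:
--             for j in range(lb):
--                 if b[lb-1-j]==1:
--                     rm[i-j] = rm[i-j]^b[lb-1-j]
--                     count+=1
--             ret.append(1)
--         else:
--             ret.append(0)
--     ret.reverse()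
--     rm = strip_zero(rm)
--     return ret,rm,count
--
-- def strip_zero(l):
--     ret = list(l)
--     while len(ret)>0 and ret[-1]==0:
--         ret.pop(-1)
--     return ret
-- ===== SOURCE B (Python) =====
-- def gf2_poly_div_count(a, b):
--     # Back-substitution on the triangular Toeplitz system instead of in-place long
--     # division: each quotient bit is solved from a and the already-solved higher
--     # bits; the remainder is then reconstructed as a XOR (quotient * mask(b)) by
--     # XOR-ing shifted copies of the divisor's 1-mask; the XOR count is the closed
--     # form popcount(quotient) * (number of 1-coefficients of b).
--     def strip(l):
--         n = len(l)
--         while n and l[n - 1] == 0: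
--             n -= 1
--         return l[:n]
--     a = strip(a)
--     b = strip(b)
--     la, lb = len(a), len(b)
--     assert lb > 0
--     bbit = [1 if c == 1 else 0 for c in b]
--     tmask = bbit[:-1]
--     qh = []                         # quotient bits, highest degree first
--     for v in reversed(a[lb - 1:]):
--         t = 0
--         for x, y in zip(reversed(qh), reversed(tmask)):
--             if y:
--                 t ^= x
--         qh.append(1 if (v ^ t) == 1 else 0)
--     fr = [0] * la                   # flip parities, highest-degree coefficient first
--     for s, qk in enumerate(qh):
--         if qk:
--             fr[s:s + lb] = [f ^ bm for f, bm in zip(fr[s:s + lb], reversed(bbit))]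
--     rm = strip([x ^ f for x, f in zip(a, reversed(fr))])
--     return qh[::-1], rm, sum(qh) * sum(bbit)
-- ===== Notes on version B (the rewrite author's own statement) =====
-- stated objective: alternative
-- what changed: Instead of A's in-place long division that repeatedly XORs the divisor into a mutable remainder array, B solves each quotient bit by back-substitution on the triangular Toeplitz system (a dot product of the already-solved quotient bits with the divisor's 1-mask), reconstructs the remainder afterwards as a XOR (quotient * mask(b)) via shifted-mask XORs, and obtains the XOR count by the closed form popcount(quotient) * popcount-of-1s(b).
import Mathlib
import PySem

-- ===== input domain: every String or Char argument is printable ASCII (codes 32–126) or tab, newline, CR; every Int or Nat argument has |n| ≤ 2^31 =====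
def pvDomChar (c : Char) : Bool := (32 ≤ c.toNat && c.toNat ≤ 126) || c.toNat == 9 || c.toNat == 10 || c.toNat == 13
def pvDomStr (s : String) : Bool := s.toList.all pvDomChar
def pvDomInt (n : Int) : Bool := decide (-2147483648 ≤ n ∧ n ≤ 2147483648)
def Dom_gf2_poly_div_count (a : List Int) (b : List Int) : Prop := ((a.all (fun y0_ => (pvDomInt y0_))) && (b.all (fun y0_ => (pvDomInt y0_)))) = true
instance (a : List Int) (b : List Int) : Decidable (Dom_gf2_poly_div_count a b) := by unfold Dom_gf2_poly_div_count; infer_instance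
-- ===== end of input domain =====

-- B replaces A's in-place long division by back-substitution on the triangular Toeplitz
-- system (each quotient bit is a dot product of the solved higher bits with the divisor's
-- 1-mask), reconstructs the remainder afterwards as a XOR (quotient * mask(b)), and obtains
-- the XOR count by the closed form popcount(quotient) * popcount-of-1s(b); objective:
-- alternative structure, same asymptotic cost.

-- ===== PORT A =====
-- while len(ret)>0 and ret[-1]==0: ret.pop(-1)
def stripZero (l : List Int) : List Int :=
  if h : l ≠ [] then
    if l.getLast h == 0 then stripZero l.dropLast else l
  else l
termination_by l.length
decreasing_by
  have := List.length_pos_of_ne_nil h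
  simp [List.length_dropLast]; omega

def gf2_poly_div_count (a : List Int) (b : List Int) : List Int × List Int × Int :=
  let a' := stripZero a
  let la : Int := a'.length
  let b' := stripZero b
  let lb : Int := b'.length
  -- assert lb > 0 : Pre_gf2_poly_div_count excludes the b whose stripped form is empty
  let st :=
    (PySem.List.pyRange (la - 1) (lb - 2) (-1)).foldl
      (fun (st : List Int × List Int × Int) (i : Int) =>
        if PySem.List.pyGetD st.1 i 0 == 1 then
          let st2 :=
            (PySem.List.pyRange 0 lb 1).foldl
              (fun (st2 : List Int × Int) (j : Int) =>
                if PySem.List.pyGetD b' (lb - 1 - j) 0 == 1 then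
                  (PySem.List.pySetD st2.1 (i - j)
                      (PySem.Int.bxor (PySem.List.pyGetD st2.1 (i - j) 0)
                        (PySem.List.pyGetD b' (lb - 1 - j) 0)),
                    st2.2 + 1)
                else st2)
              (st.1, st.2.2)
          (st2.1, st.2.1 ++ [(1 : Int)], st2.2)
        else (st.1, st.2.1 ++ [(0 : Int)], st.2.2))
      (a', ([] : List Int), (0 : Int))
  (st.2.1.reverse, stripZero st.1, st.2.2)

-- ===== PORT B =====
-- n = len(l); while n and l[n-1] == 0: n -= 1; return l[:n]
def stripLenB (l : List Int) : Nat → Nat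
  | 0 => 0
  | n + 1 => if l.getD n 0 == 0 then stripLenB l n else n + 1

def stripB (l : List Int) : List Int := l.take (stripLenB l l.length)

-- t = 0; for x, y in zip(reversed(qh), reversed(tmask)): if y: t ^= x
def tdotB (qr mt : List Int) : Int :=
  (qr.zip mt).foldl (fun t p => if p.2 ≠ 0 then PySem.Int.bxor t p.1 else t) 0

def gf2_poly_div_count_alt (a : List Int) (b : List Int) : List Int × List Int × Int :=
  let a' := stripB a
  let b' := stripB b
  let la := a'.length
  let lb := b'.length
  -- assert lb > 0 : excluded by Pre_gf2_poly_div_count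
  let bbit := b'.map (fun c => if c == 1 then (1 : Int) else 0)
  let tmask := bbit.dropLast          -- bbit[:-1]
  let qh := ((PySem.List.slice a' (some ((lb : Int) - 1)) none).reverse).foldl
      (fun (qh : List Int) (v : Int) =>
        qh ++ [if PySem.Int.bxor v (tdotB qh.reverse tmask.reverse) == 1 then (1 : Int) else 0])
      []
  let fr := (PySem.List.enumerate qh).foldl
      (fun (fr : List Int) (sq : Int × Int) =>
        if sq.2 ≠ 0 then
          -- fr[s:s+lb] = [f ^ bm for f, bm in zip(fr[s:s+lb], reversed(bbit))]
          -- (slice assignment, ported as fr[:s] ++ new ++ fr[s+lb:]; s = sq.1 ≥ 0)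
          PySem.List.slice fr none (some sq.1) ++
          ((PySem.List.slice fr (some sq.1) (some (sq.1 + (lb : Int)))).zip bbit.reverse).map
              (fun p => PySem.Int.bxor p.1 p.2) ++
          PySem.List.slice fr (some (sq.1 + (lb : Int))) none
        else fr)
      (List.replicate la (0 : Int))
  let rm := stripB ((a'.zip fr.reverse).map (fun p => PySem.Int.bxor p.1 p.2))
  (qh.reverse, rm, qh.sum * bbit.sum)

-- ===== PRECONDITION & SPEC =====
-- Pre_ excludes exactly the b all of whose entries are 0: there Python A fails its `assert lb>0`
-- (AssertionError), returning nothing.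
def Pre_gf2_poly_div_count (a : List Int) (b : List Int) : Prop := ∃ x ∈ b, x ≠ 0
instance (a : List Int) (b : List Int) : Decidable (Pre_gf2_poly_div_count a b) := by
  unfold Pre_gf2_poly_div_count; infer_instance

def pvWitness_gf2_poly_div_count : List Int × List Int := ([1, 1, 0, 1], [1, 1])

def Spec_gf2_poly_div_count (a : List Int) (b : List Int) (out : List Int × List Int × Int) : Prop := out = gf2_poly_div_count_alt a b
instance (a : List Int) (b : List Int) (out : List Int × List Int × Int) : Decidable (Spec_gf2_poly_div_count a b out) := by unfold Spec_gf2_poly_div_count; infer_instance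

-- ===== CLAIM (what is proved, stated in full; the proofs are below) =====
def Claim_equal_gf2_poly_div_count : Prop := ∀ (a : List Int) (b : List Int), Dom_gf2_poly_div_count a b → Pre_gf2_poly_div_count a b → Spec_gf2_poly_div_count a b (gf2_poly_div_count a b)

-- ===== LEMMAS AND PROOFS =====

-- x ^ 1 ^ 1 == x (Python xor by 1 is an involution)
theorem bxor_one_one (x : Int) : PySem.Int.bxor (PySem.Int.bxor x 1) 1 = x := by
  unfold PySem.Int.bxor
  by_cases hx : 0 ≤ x
  · simp only [hx, if_pos, show (0:Int) ≤ 1 by norm_num]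
    rw [if_pos (by positivity)]
    simp [Nat.xor_xor_cancel_right, hx]
  · rw [if_neg hx]
    simp only [show (0:Int) ≤ 1 by norm_num, if_true, Int.toNat_one]
    have h1 : ¬ (0 ≤ -((((-x - 1).toNat ^^^ 1 : Nat)) : Int) - 1) := by omega
    rw [if_neg h1]
    have h2 : (-(-((((-x - 1).toNat ^^^ 1 : Nat)) : Int) - 1) - 1).toNat = ((-x - 1).toNat ^^^ 1) := by
      omega
    rw [h2, Nat.xor_xor_cancel_right]
    omega

theorem bxor_zero_left (x : Int) : PySem.Int.bxor 0 x = x := by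
  rw [PySem.Int.bxor_comm]; simp

theorem bxor01_mem {x y : Int} (hx : x = 0 ∨ x = 1) (hy : y = 0 ∨ y = 1) :
    PySem.Int.bxor x y = 0 ∨ PySem.Int.bxor x y = 1 := by
  rcases hx with hx | hx <;> rcases hy with hy | hy <;> subst hx <;> subst hy <;> decide

def entries01 (l : List Int) : Prop := ∀ x ∈ l, x = 0 ∨ x = 1

def flipI (t x : Int) : Int := if t == 1 then PySem.Int.bxor x 1 else x

def applyFull (p rev : List Int) : List Int := List.zipWith flipI p rev

def pxor2 (m p : List Int) : List Int := List.zipWith PySem.Int.bxor p m ++ p.drop m.length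

def maskOf (brev : List Int) : List Int := brev.map (fun y => if y == 1 then (1 : Int) else 0)

def xorWindow (brev rev : List Int) : List Int :=
  ((rev.zip brev).map (fun p => if p.2 == 1 then PySem.Int.bxor p.1 1 else p.1)) ++
    rev.drop brev.length

theorem length_xorWindow (brev rev : List Int) : (xorWindow brev rev).length = rev.length := by
  simp [xorWindow]; omega

def divRec (brev rev : List Int) : List Int × List Int :=
  if h : brev ≠ [] ∧ brev.length ≤ rev.length then
    if rev.headD 0 == 1 then
      (1 :: (divRec brev (xorWindow brev rev).tail).1,
       (xorWindow brev rev).headD 0 :: (divRec brev (xorWindow brev rev).tail).2)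
    else
      (0 :: (divRec brev rev.tail).1, rev.headD 0 :: (divRec brev rev.tail).2)
  else ([], rev)
termination_by rev.length
decreasing_by
  · have := List.length_pos_of_ne_nil h.1
    simp [List.length_tail, length_xorWindow]; omega
  · have := List.length_pos_of_ne_nil h.1
    simp [List.length_tail]; omega

def onlQ (m : List Int) (p rev : List Int) : List Int :=
  if h : m ≠ [] ∧ m.length ≤ rev.length then
    let q : Int := if flipI (p.headD 0) (rev.headD 0) == 1 then 1 else 0
    q :: onlQ m ((if q == 1 then pxor2 m p else p).tail) rev.tail
  else []
termination_by rev.length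
decreasing_by
  have := List.length_pos_of_ne_nil h.1
  simp [List.length_tail]; omega

def sched (m : List Int) : List Int → List Int → List Int
  | [], p => p
  | q :: Q, p =>
      (if q == 1 then pxor2 m p else p).headD 0 ::
        sched m Q (if q == 1 then pxor2 m p else p).tail

def pendR (m : List Int) : List Int → Nat → List Int
  | [], n => List.replicate n 0
  | q :: qr, n => (if q == 1 then pxor2 m (pendR m qr n) else pendR m qr n).tail

theorem flipI_flipI {t m : Int} (ht : t = 0 ∨ t = 1) (hm : m = 0 ∨ m = 1) (x : Int) :
    flipI m (flipI t x) = flipI (PySem.Int.bxor t m) x := by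
  rcases ht with ht | ht <;> rcases hm with hm | hm <;> subst ht <;> subst hm <;>
    simp [flipI, bxor_one_one, show PySem.Int.bxor (0:Int) 0 = 0 from by decide,
      show PySem.Int.bxor (0:Int) 1 = 1 from by decide,
      show PySem.Int.bxor (1:Int) 0 = 1 from by decide,
      show PySem.Int.bxor (1:Int) 1 = 0 from by decide]

theorem flipI_eq_bxor {t : Int} (ht : t = 0 ∨ t = 1) (x : Int) :
    flipI t x = PySem.Int.bxor x t := by
  rcases ht with ht | ht <;> subst ht <;> simp [flipI]

theorem length_pxor2 {m p : List Int} (h : m.length ≤ p.length) :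
    (pxor2 m p).length = p.length := by
  simp [pxor2]; omega

theorem pxor2_nil (p : List Int) : pxor2 [] p = p := by simp [pxor2]

theorem pxor2_cons (mh : Int) (mt : List Int) (t : Int) (p : List Int) :
    pxor2 (mh :: mt) (t :: p) = PySem.Int.bxor t mh :: pxor2 mt p := by
  simp [pxor2]

theorem entries01_pxor2 {m p : List Int} (hm : entries01 m) (hp : entries01 p) :
    entries01 (pxor2 m p) := by
  induction m generalizing p with
  | nil => rw [pxor2_nil]; exact hp
  | cons mh mt ih =>
    cases p with
    | nil => intro x hx; simp [pxor2] at hx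
    | cons t p =>
      rw [pxor2_cons]
      intro x hx
      rcases List.mem_cons.mp hx with h | h
      · subst h
        exact bxor01_mem (hp t (by simp)) (hm mh (by simp))
      · exact ih (fun y hy => hm y (by simp [hy])) (fun y hy => hp y (by simp [hy])) x h

theorem applyFull_zeros (rev : List Int) : applyFull (List.replicate rev.length 0) rev = rev := by
  induction rev with
  | nil => rfl
  | cons v r ih =>
    simp only [List.length_cons, List.replicate_succ, applyFull, List.zipWith_cons_cons]
    rw [show flipI 0 v = v from by simp [flipI]]
    exact congrArg _ ih

theorem stripLenB_le (l : List Int) : ∀ n, stripLenB l n ≤ n := by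
  intro n; induction n with
  | zero => simp [stripLenB]
  | succ n ih => rw [stripLenB]; split <;> omega

theorem stripLenB_append (l : List Int) (x : Int) :
    ∀ n, n ≤ l.length → stripLenB (l ++ [x]) n = stripLenB l n := by
  intro n
  induction n with
  | zero => intro _; rfl
  | succ n ih =>
    intro h
    rw [stripLenB, stripLenB]
    have : (l ++ [x]).getD n 0 = l.getD n 0 := by
      unfold List.getD
      rw [List.getElem?_append_left (by omega)]
    rw [this, ih (by omega)]

theorem stripB_eq_stripZero (l : List Int) : stripB l = stripZero l := by
  induction l using List.reverseRecOn with
  | nil => simp [stripB, stripLenB, stripZero]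
  | append_singleton l x ih =>
    rw [stripZero]
    have hne : l ++ [x] ≠ [] := by simp
    rw [dif_pos hne]
    unfold stripB
    have hlen : (l ++ [x]).length = l.length + 1 := by simp
    rw [hlen, stripLenB]
    have hget : (l ++ [x]).getD l.length 0 = x := by
      unfold List.getD
      rw [List.getElem?_append_right (le_refl _)]
      simp
    rw [hget]
    by_cases hx : x = 0
    · rw [if_pos (by simp [hx]), stripLenB_append _ _ _ (le_refl _)]
      rw [List.take_append_of_le_length (stripLenB_le l l.length)]
      simp [hx]
      simpa [stripB] using ih
    · rw [if_neg (by simp [hx]), if_neg (by simp [List.getLast_append]; exact hx)]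
      simp

theorem stripZero_eq_nil_iff (l : List Int) : stripZero l = [] ↔ ∀ x ∈ l, x = 0 := by
  induction l using List.reverseRecOn with
  | nil => simp [stripZero]
  | append_singleton l x ih =>
    rw [stripZero]
    have hne : l ++ [x] ≠ [] := by simp
    rw [dif_pos hne]
    by_cases hx : x = 0
    · rw [if_pos (by simp [hx])]
      simp only [List.dropLast_concat]
      rw [ih]
      constructor
      · intro h y hy
        rcases List.mem_append.mp hy with h1 | h1
        · exact h y h1
        · simp at h1; omega
      · intro h y hy; exact h y (by simp [hy])
    · rw [if_neg (by simp [List.getLast_append]; exact hx)]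
      constructor
      · intro h; exact absurd h (by simp)
      · intro h; exact absurd (h x (by simp)) hx

theorem entries01_maskOf (brev : List Int) : entries01 (maskOf brev) := by
  intro x hx
  simp [maskOf] at hx
  obtain ⟨y, -, hy⟩ := hx
  split at hy <;> simp_all

theorem entries01_tail {p : List Int} (hp : entries01 p) : entries01 p.tail := by
  cases p with
  | nil => exact hp
  | cons x xs => exact fun y hy => hp y (List.mem_cons_of_mem x (by simpa using hy))

theorem entries01_headD {p : List Int} (hp : entries01 p) : p.headD 0 = 0 ∨ p.headD 0 = 1 := by
  cases p with
  | nil => left; rfl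
  | cons x xs => exact hp x (by simp)

theorem xorWindow_applyFull (brev : List Int) :
    ∀ (p rev : List Int), p.length = rev.length → entries01 p →
      xorWindow brev (applyFull p rev) = applyFull (pxor2 (maskOf brev) p) rev := by
  induction brev with
  | nil =>
    intro p rev hlen hp
    simp [xorWindow, maskOf, pxor2, applyFull]
  | cons y bt ih =>
    intro p rev hlen hp
    cases rev with
    | nil =>
      have : p = [] := List.eq_nil_of_length_eq_zero (by simpa using hlen)
      subst this
      simp [xorWindow, applyFull, pxor2, maskOf]
    | cons v rev' =>
      cases p with
      | nil => simp at hlen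
      | cons t p' =>
        have hlen' : p'.length = rev'.length := by simpa using hlen
        have ht : t = 0 ∨ t = 1 := hp t (by simp)
        have hp' : entries01 p' := fun x hx => hp x (by simp [hx])
        have hmb : (if y == 1 then (1:Int) else 0) = 0 ∨ (if y == 1 then (1:Int) else 0) = 1 := by
          split <;> simp
        show xorWindow (y :: bt) (flipI t v :: applyFull p' rev') = _
        have hL : xorWindow (y :: bt) (flipI t v :: applyFull p' rev')
            = (if y == 1 then PySem.Int.bxor (flipI t v) 1 else flipI t v)
              :: xorWindow bt (applyFull p' rev') := by
          simp [xorWindow]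
        rw [hL, ih p' rev' hlen' hp']
        have hmask : maskOf (y :: bt) = (if y == 1 then (1:Int) else 0) :: maskOf bt := by
          simp [maskOf]
        rw [hmask, pxor2_cons]
        show _ = flipI (PySem.Int.bxor t (if y == 1 then (1:Int) else 0)) v
            :: applyFull (pxor2 (maskOf bt) p') rev'
        congr 1
        rw [← flipI_flipI ht hmb]
        by_cases hy : y == 1 <;> simp [flipI, hy]

theorem fold01 (l : List (Int × Int)) :
    ∀ (hl : ∀ p ∈ l, p.1 = 0 ∨ p.1 = 1) (t : Int), t = 0 ∨ t = 1 →
      l.foldl (fun t p => if p.2 ≠ 0 then PySem.Int.bxor t p.1 else t) t = 0 ∨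
      l.foldl (fun t p => if p.2 ≠ 0 then PySem.Int.bxor t p.1 else t) t = 1 := by
  induction l with
  | nil => intro _ t ht; simpa using ht
  | cons p l ih =>
    intro hl t ht
    simp only [List.foldl_cons]
    by_cases hc : p.2 ≠ 0
    · rw [if_pos hc]
      exact ih (fun q hq => hl q (by simp [hq])) _ (bxor01_mem ht (hl p (by simp)))
    · rw [if_neg hc]
      exact ih (fun q hq => hl q (by simp [hq])) t ht

theorem tdot_fold_init (l : List (Int × Int)) :
    ∀ (hl : ∀ p ∈ l, p.1 = 0 ∨ p.1 = 1) (t : Int), t = 0 ∨ t = 1 →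
      l.foldl (fun t p => if p.2 ≠ 0 then PySem.Int.bxor t p.1 else t) t
        = PySem.Int.bxor t
            (l.foldl (fun t p => if p.2 ≠ 0 then PySem.Int.bxor t p.1 else t) 0) := by
  induction l with
  | nil => intro _ t _; simp
  | cons p l ih =>
    intro hl t ht
    have hp1 : p.1 = 0 ∨ p.1 = 1 := hl p (by simp)
    have hl' : ∀ q ∈ l, q.1 = 0 ∨ q.1 = 1 := fun q hq => hl q (by simp [hq])
    simp only [List.foldl_cons]
    by_cases hc : p.2 ≠ 0
    · rw [if_pos hc, if_pos hc]
      rw [ih hl' _ (bxor01_mem ht hp1), ih hl' _ (bxor01_mem (Or.inl rfl) hp1)]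
      have hX : ∀ X, X = 0 ∨ X = 1 →
          PySem.Int.bxor (PySem.Int.bxor t p.1) X
            = PySem.Int.bxor t (PySem.Int.bxor (PySem.Int.bxor 0 p.1) X) := by
        intro X hXm
        rcases ht with h1 | h1 <;> rcases hp1 with h2 | h2 <;> rcases hXm with h3 | h3 <;>
          simp only [h1, h2, h3] <;> decide
      exact hX _ (fold01 l hl' 0 (Or.inl rfl))
    · rw [if_neg hc, if_neg hc, ih hl' t ht]

theorem tdot01 (qr : List Int) (hqr : entries01 qr) (mt : List Int) :
    tdotB qr mt = 0 ∨ tdotB qr mt = 1 := by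
  refine fold01 _ ?_ 0 (Or.inl rfl)
  intro p hp
  exact hqr p.1 (List.of_mem_zip hp).1

theorem tdot_cons {q : Int} (hq : q = 0 ∨ q = 1) (qr : List Int) (hqr : entries01 qr)
    (c : Int) (mt : List Int) :
    tdotB (q :: qr) (c :: mt)
      = if c ≠ 0 then PySem.Int.bxor (tdotB qr mt) q else tdotB qr mt := by
  have hfst : ∀ p ∈ qr.zip mt, p.1 = 0 ∨ p.1 = 1 := fun p hp => hqr p.1 (List.of_mem_zip hp).1
  show (((q, c) :: qr.zip mt).foldl (fun t p => if p.2 ≠ 0 then PySem.Int.bxor t p.1 else t) 0)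
      = _
  simp only [List.foldl_cons]
  by_cases hc : c ≠ 0
  · rw [if_pos hc, if_pos hc, bxor_zero_left]
    rw [tdot_fold_init _ hfst q hq]
    have hT := fold01 _ hfst 0 (Or.inl rfl)
    rcases hq with h1 | h1 <;> rcases hT with h2 | h2 <;>
      simp only [tdotB, h1, h2] <;> decide
  · rw [if_neg hc, if_neg hc]
    rfl

theorem tdot_nil_right (qr : List Int) : tdotB qr [] = 0 := by simp [tdotB]

theorem pendR_closed (m : List Int) (hm : entries01 m) :
    ∀ (qr : List Int) (n : Nat), entries01 qr → qr.length + m.length ≤ n →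
      pendR m qr n = (List.range (n - qr.length)).map (fun j => tdotB qr (m.drop (j + 1))) := by
  intro qr
  induction qr with
  | nil =>
    intro n _ _
    show List.replicate n 0 = _
    rw [show (fun j => tdotB ([] : List Int) (m.drop (j + 1))) = (fun _ => (0:Int)) from by
      funext j; simp [tdotB]]
    simp [List.map_const']
  | cons q qr ih =>
    intro n hq01 hlen
    have hq : q = 0 ∨ q = 1 := hq01 q (by simp)
    have hqr01 : entries01 qr := fun x hx => hq01 x (by simp [hx])
    have hL := ih n hqr01 (by simp at hlen ⊢; omega)
    set s := qr.length with hs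
    set L := (List.range (n - s)).map (fun j => tdotB qr (m.drop (j + 1))) with hLdef
    have hLlen : L.length = n - s := by simp [hLdef]
    have hslen : s + 1 + m.length ≤ n := by simpa using hlen
    have hmL : m.length ≤ L.length := by omega
    show (if q == 1 then pxor2 m (pendR m qr n) else pendR m qr n).tail = _
    rw [hL]
    have hgoal_len : (n - s) - 1 = n - (s + 1) := by omega
    -- common getElem facts
    have hLget : ∀ (j : Nat) (hj : j < n - s), L[j]'(by omega) = tdotB qr (m.drop (j + 1)) := by
      intro j hj; simp [hLdef]
    have hmain : ∀ (j : Nat), j + 1 < n - s →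
        tdotB (q :: qr) (m.drop (j + 1))
          = if h : j + 1 < m.length then PySem.Int.bxor (tdotB qr (m.drop (j + 2))) (if m[j+1] ≠ 0 then q else 0)
            else 0 := by
      intro j hj
      by_cases hjm : j + 1 < m.length
      · rw [dif_pos hjm]
        rw [List.drop_eq_getElem_cons hjm]
        rw [tdot_cons hq qr hqr01]
        by_cases hc : m[j+1] ≠ 0
        · rw [if_pos hc, if_pos hc]
        · rw [if_neg hc, if_neg hc]
          rcases tdot01 qr hqr01 (m.drop (j+2)) with h | h <;> rw [h] <;> decide
      · rw [dif_neg hjm]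
        rw [List.drop_eq_nil_of_le (by omega)]
        exact tdot_nil_right _
    rcases hq with hq0 | hq1
    · -- q = 0
      subst hq0
      rw [if_neg (by decide)]
      apply List.ext_getElem
      · simp [hLlen]; omega
      · intro j hj1 hj2
        have hjlt : j + 1 < n - s := by simp [hLlen] at hj1; omega
        rw [List.getElem_tail]
        rw [hLget (j+1) (by omega)]
        simp only [List.getElem_map, List.getElem_range]
        rw [hmain j hjlt]
        by_cases hjm : j + 1 < m.length
        · rw [dif_pos hjm]
          rw [show (if m[j+1] ≠ 0 then (0:Int) else 0) = 0 from by split <;> rfl]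
          rcases tdot01 qr hqr01 (m.drop (j+2)) with h | h <;> rw [h] <;> decide
        · rw [dif_neg hjm]
          rw [List.drop_eq_nil_of_le (by omega)]
          exact tdot_nil_right _
    · -- q = 1
      subst hq1
      rw [if_pos (by decide)]
      apply List.ext_getElem
      · rw [List.length_tail, length_pxor2 hmL, hLlen]; simp; omega
      · intro j hj1 hj2
        have hjlt : j + 1 < n - s := by
          rw [List.length_tail, length_pxor2 hmL, hLlen] at hj1; omega
        rw [List.getElem_tail]
        simp only [List.getElem_map, List.getElem_range]
        rw [hmain j hjlt]
        have hpx : (pxor2 m L)[j+1]'(by rw [length_pxor2 hmL, hLlen]; omega)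
            = if h : j + 1 < m.length then PySem.Int.bxor (L[j+1]'(by omega)) m[j+1]
              else L[j+1]'(by omega) := by
          by_cases hjm : j + 1 < m.length
          · rw [dif_pos hjm]
            unfold pxor2
            rw [List.getElem_append_left (by simp; omega)]
            simp
          · rw [dif_neg hjm]
            unfold pxor2
            rw [List.getElem_append_right (by simp; omega)]
            have : (List.zipWith PySem.Int.bxor L m).length = m.length := by simp; omega
            simp only [this]
            rw [List.getElem_drop]
            congr 1
            omega
        rw [hpx]
        by_cases hjm : j + 1 < m.length
        · rw [dif_pos hjm, dif_pos hjm, hLget (j+1) (by omega)]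
          rcases hm m[j+1] (by exact List.getElem_mem _) with h | h
          · rw [h, if_neg (by simp)]
          · rw [h, if_pos (by norm_num)]
        · rw [dif_neg hjm, dif_neg hjm, hLget (j+1) (by omega)]
          rw [List.drop_eq_nil_of_le (as := m) (by omega)]
          exact tdot_nil_right _

theorem pendR_headD (m : List Int) (hm : m ≠ []) (hm01 : entries01 m)
    (qr : List Int) (n : Nat) (hqr : entries01 qr) (hlen : qr.length + m.length ≤ n)
    (hpos : qr.length < n) :
    (pendR m qr n).headD 0 = tdotB qr m.tail := by
  rw [pendR_closed m hm01 qr n hqr hlen]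
  have h1 : n - qr.length = (n - qr.length - 1) + 1 := by omega
  rw [h1, List.range_succ_eq_map]
  simp [List.drop_one]

theorem mapZip_eq_zipWith {α β γ : Type} (g : α → β → γ) (l1 : List α) (l2 : List β) :
    (l1.zip l2).map (fun p => g p.1 p.2) = List.zipWith g l1 l2 := by
  induction l1 generalizing l2 with
  | nil => simp
  | cons a t ih => cases l2 <;> simp [ih]

theorem zipWith_take_left {α β γ : Type} (f : α → β → γ) :
    ∀ (p : List α) (m : List β), List.zipWith f (p.take m.length) m = List.zipWith f p m := by
  intro p
  induction p with
  | nil => intro m; simp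
  | cons x p ih =>
    intro m
    cases m with
    | nil => simp
    | cons y m => simp [ih]

theorem zipWith_flip_eq : ∀ (P A : List Int), entries01 P →
    List.zipWith flipI P A = (A.zip P).map (fun p => PySem.Int.bxor p.1 p.2) := by
  intro P
  induction P with
  | nil => intro A _; simp
  | cons t P ih =>
    intro A hP
    cases A with
    | nil => simp
    | cons x A =>
      simp only [List.zipWith_cons_cons, List.zip_cons_cons, List.map_cons]
      congr 1
      · rcases hP t (by simp) with h | h <;> subst h <;> simp [flipI]
      · exact ih A (entries01_tail hP)

theorem master (brev : List Int) (hb : brev ≠ []) (hm01 : entries01 (maskOf brev)) :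
    ∀ (n : Nat) (rev p : List Int), rev.length ≤ n → p.length = rev.length → entries01 p →
      divRec brev (applyFull p rev) =
        (onlQ (maskOf brev) p rev,
         applyFull (sched (maskOf brev) (onlQ (maskOf brev) p rev) p) rev) := by
  have hmlen : (maskOf brev).length = brev.length := by simp [maskOf]
  have hmne : maskOf brev ≠ [] := by
    intro h; apply hb; cases brev; rfl; simp [maskOf] at h
  intro n
  induction n with
  | zero =>
    intro rev p hn hlen hp
    have : rev = [] := List.eq_nil_of_length_eq_zero (by omega)
    subst this
    have : p = [] := List.eq_nil_of_length_eq_zero (by simpa using hlen)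
    subst this
    rw [divRec, dif_neg (by simp [applyFull])]
    rw [onlQ, dif_neg (by simp)]
    simp [sched, applyFull]
  | succ n ih =>
    intro rev p hn hlen hp
    have hAFlen : (applyFull p rev).length = rev.length := by
      simp [applyFull]; omega
    by_cases hguard : brev.length ≤ rev.length
    · -- one division step
      have hrevne : rev ≠ [] := by
        intro h; subst h
        simp only [List.length_nil, Nat.le_zero] at hguard
        exact hb (List.eq_nil_of_length_eq_zero hguard)
      obtain ⟨v, rev', rfl⟩ := List.exists_cons_of_ne_nil hrevne
      obtain ⟨t, p', rfl⟩ := List.exists_cons_of_ne_nil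
        (show p ≠ [] by intro h; subst h; simp at hlen)
      obtain ⟨m0, mt, hmeq⟩ := List.exists_cons_of_ne_nil hmne
      have ht : t = 0 ∨ t = 1 := hp t (by simp)
      have hp' : entries01 p' := fun x hx => hp x (by simp [hx])
      have hlen' : p'.length = rev'.length := by simpa using hlen
      have hm0 : m0 = 0 ∨ m0 = 1 := by
        rw [hmeq] at hm01; exact hm01 m0 (by simp)
      have hmt01 : entries01 mt := by
        rw [hmeq] at hm01; exact fun x hx => hm01 x (by simp [hx])
      have hmtlen : mt.length + 1 = brev.length := by
        have := congrArg List.length hmeq; simp at this; omega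
      have hAF : applyFull (t :: p') (v :: rev') = flipI t v :: applyFull p' rev' := by
        simp [applyFull]
      rw [hAF, divRec, dif_pos ⟨hb, by rw [← hAF, hAFlen]; simpa using hguard⟩]
      rw [onlQ, dif_pos ⟨hmne, by rw [hmlen]; simpa using hguard⟩]
      simp only [List.headD_cons, List.tail_cons]
      by_cases hhit : flipI t v = 1
      · -- quotient bit 1
        simp only [show (flipI t v == 1) = true from by simp [hhit], if_true,
          show ((1:Int) == 1) = true from rfl]
        have hXW : xorWindow brev (flipI t v :: applyFull p' rev')
            = applyFull (pxor2 (maskOf brev) (t :: p')) (v :: rev') := by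
          rw [← hAF]
          exact xorWindow_applyFull brev _ _ (by simpa using hlen) hp
        have hpx : pxor2 (maskOf brev) (t :: p')
            = PySem.Int.bxor t m0 :: pxor2 mt p' := by
          rw [hmeq, pxor2_cons]
        have hAF2 : applyFull (pxor2 (maskOf brev) (t :: p')) (v :: rev')
            = flipI (PySem.Int.bxor t m0) v :: applyFull (pxor2 mt p') rev' := by
          rw [hpx]; simp [applyFull]
        rw [hXW, hAF2]
        simp only [List.headD_cons, List.tail_cons, hpx]
        have hlen2 : (pxor2 mt p').length = p'.length := by
          apply length_pxor2; simp at hguard; omega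
        have hrec := ih rev' (pxor2 mt p') (by simpa using hn) (by omega)
          (entries01_pxor2 hmt01 hp')
        rw [hrec]
        rw [Prod.mk.injEq]
        refine ⟨rfl, ?_⟩
        show _ :: _ = applyFull (sched (maskOf brev)
            (1 :: onlQ (maskOf brev) (pxor2 mt p') rev') (t :: p')) (v :: rev')
        rw [sched]
        rw [show ((1:Int) == 1) = true from rfl]
        simp only [if_pos, if_true, hpx, List.headD_cons, List.tail_cons]
        simp [applyFull]
      · -- quotient bit 0
        simp only [show (flipI t v == 1) = false from by simp [hhit], Bool.false_eq_true,
          if_false, show ((0:Int) == 1) = false from rfl, List.tail_cons]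
        have hrec := ih rev' p' (by simpa using hn) hlen' hp'
        rw [hrec]
        rw [Prod.mk.injEq]
        refine ⟨rfl, ?_⟩
        show _ :: _ = applyFull (sched (maskOf brev)
            (0 :: onlQ (maskOf brev) p' rev') (t :: p')) (v :: rev')
        rw [sched]
        rw [show ((0:Int) == 1) = false from rfl]
        simp only [Bool.false_eq_true, if_false, List.headD_cons, List.tail_cons]
        simp [applyFull]
    · -- division over: too short
      rw [divRec, dif_neg (by rw [hAFlen]; tauto)]
      rw [onlQ, dif_neg (by rw [hmlen]; tauto)]
      simp [sched]

theorem entries01_onlQ (m : List Int) :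
    ∀ (nf : Nat) (rev p : List Int), rev.length ≤ nf → entries01 (onlQ m p rev) := by
  intro nf
  induction nf with
  | zero =>
    intro rev p h
    have : rev = [] := List.eq_nil_of_length_eq_zero (by omega)
    subst this
    rw [onlQ]
    split
    · rename_i hc; exact absurd (Nat.le_zero.mp hc.2) (by intro h2; exact hc.1 (List.eq_nil_of_length_eq_zero h2))
    · intro x hx; simp at hx
  | succ nf ih =>
    intro rev p h
    rw [onlQ]
    split
    · intro x hx
      rcases List.mem_cons.mp hx with h1 | h1
      · subst h1; split <;> simp
      · rename_i hc
        have hrl : 0 < rev.length := by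
          have := List.length_pos_of_ne_nil hc.1; omega
        exact ih rev.tail _ (by simp [List.length_tail]; omega) x h1
    · intro x hx; simp at hx

theorem length_onlQ (m : List Int) (hm : m ≠ []) :
    ∀ (nf : Nat) (rev p : List Int), rev.length ≤ nf →
      onlQ m p rev = [] ∨ (onlQ m p rev).length + m.length = rev.length + 1 := by
  intro nf
  induction nf with
  | zero =>
    intro rev p h
    rw [onlQ]
    split
    · rename_i hc
      have := List.length_pos_of_ne_nil hc.1; omega
    · left; rfl
  | succ nf ih =>
    intro rev p h
    rw [onlQ]
    split
    · rename_i hc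
      right
      have hrl : 0 < rev.length := by
        have := List.length_pos_of_ne_nil hc.1; omega
      dsimp only
      rcases ih rev.tail ((if (if flipI (p.headD 0) (rev.headD 0) == 1 then (1:Int) else 0) == 1 then pxor2 m p else p).tail)
          (by simp [List.length_tail]; omega) with h1 | h1
      · -- inner quotient empty : m fills the rest, m.length = rev.length
        rw [h1]
        rw [onlQ] at h1
        split at h1
        · simp at h1
        · rename_i hc2
          simp only [not_and, not_le] at hc2
          have := hc2 hc.1
          rw [List.length_tail] at this
          simp only [List.length_cons, List.length_nil]
          omega
      · rw [List.length_cons]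
        rw [List.length_tail] at h1
        omega
    · left; rfl

theorem length_sched (m : List Int) (hm : m ≠ []) :
    ∀ (Q p : List Int), (Q.length + m.length ≤ p.length + 1 ∨ Q = []) →
      (sched m Q p).length = p.length := by
  intro Q
  induction Q with
  | nil => intro p _; rfl
  | cons q Q ih =>
    intro p hh
    have hml : m.length ≤ p.length := by
      rcases hh with h | h
      · simp at h; omega
      · simp at h
    have hp0 : 0 < p.length := lt_of_lt_of_le (List.length_pos_of_ne_nil hm) hml
    rw [sched]
    have hplen : (if q == 1 then pxor2 m p else p).length = p.length := by
      split
      · exact length_pxor2 hml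
      · rfl
    rw [List.length_cons, ih _ ?_, List.length_tail, hplen]
    · omega
    · left
      rw [List.length_tail, hplen]
      rcases hh with h | h
      · simp at h; omega
      · simp at h

theorem entries01_sched (m : List Int) (hm01 : entries01 m) :
    ∀ (Q p : List Int), entries01 p → entries01 (sched m Q p) := by
  intro Q
  induction Q with
  | nil => intro p hp; exact hp
  | cons q Q ih =>
    intro p hp
    rw [sched]
    have hp' : entries01 (if q == 1 then pxor2 m p else p) := by
      split
      · exact entries01_pxor2 hm01 hp
      · exact hp
    intro x hx
    rcases List.mem_cons.mp hx with h | h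
    · subst h; exact entries01_headD hp'
    · exact ih _ (entries01_tail hp') x h

theorem bq_fold (m : List Int) (hm : m ≠ []) (hm01 : entries01 m) (n : Nat) :
    ∀ (rev qh : List Int), entries01 qh → qh.length + rev.length = n →
      (rev.take (rev.length - (m.length - 1))).foldl
          (fun (qh : List Int) (v : Int) =>
            qh ++ [if PySem.Int.bxor v (tdotB qh.reverse m.tail) == 1 then (1 : Int) else 0])
          qh
        = qh ++ onlQ m (pendR m qh.reverse n) rev := by
  intro rev
  induction rev with
  | nil =>
    intro qh h01 hlen
    rw [onlQ, dif_neg (by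
      rintro ⟨h1, h2⟩
      simp only [List.length_nil, Nat.le_zero] at h2
      exact h1 (List.eq_nil_of_length_eq_zero h2))]
    simp
  | cons v rev' ih =>
    intro qh h01 hlen
    by_cases hg : m.length ≤ rev'.length + 1
    · -- a step runs
      have htk : (v :: rev').length - (m.length - 1) = (rev'.length - (m.length - 1)) + 1 := by
        simp; have := List.length_pos_of_ne_nil hm; omega
      rw [htk, List.take_succ_cons, List.foldl_cons]
      have hhead : (pendR m qh.reverse n).headD 0 = tdotB qh.reverse m.tail := by
        apply pendR_headD m hm hm01 _ _ (fun x hx => h01 x (by simpa using hx))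
        · simp; omega
        · simp; omega
      set q : Int := if PySem.Int.bxor v (tdotB qh.reverse m.tail) == 1 then (1:Int) else 0 with hq
      have hq01 : q = 0 ∨ q = 1 := by rw [hq]; split <;> simp
      have h01' : entries01 (qh ++ [q]) := by
        intro x hx
        rcases List.mem_append.mp hx with h | h
        · exact h01 x h
        · simp at h; subst h; exact hq01
      have hihq := ih (qh ++ [q]) h01' (by simp at hlen ⊢; omega)
      rw [hihq]
      have htdot01 := tdot01 qh.reverse (fun x hx => h01 x (by simpa using hx)) m.tail
      have hqrev : (qh ++ [q]).reverse = q :: qh.reverse := by simp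
      have hstep : onlQ m (pendR m qh.reverse n) (v :: rev')
          = q :: onlQ m (pendR m (qh ++ [q]).reverse n) rev' := by
        rw [onlQ, dif_pos ⟨hm, by simpa using hg⟩]
        dsimp only
        have hflip : flipI ((pendR m qh.reverse n).headD 0) ((v :: rev').headD 0)
            = PySem.Int.bxor v (tdotB qh.reverse m.tail) := by
          rw [hhead, List.headD_cons]
          exact flipI_eq_bxor htdot01 v
        rw [hflip, List.tail_cons, ← hq]
        rw [hqrev]
        congr 1
      rw [hstep, List.append_assoc, List.singleton_append]
    · -- no step: m too long
      have htk : (v :: rev').length - (m.length - 1) = 0 := by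
        simp; have := List.length_pos_of_ne_nil hm; omega
      rw [htk, List.take_zero, List.foldl_nil]
      rw [onlQ, dif_neg (by rintro ⟨h1, h2⟩; simp at h2; omega)]
      simp

theorem bf_fold (m : List Int) (hm : m ≠ []) (hm01 : entries01 m) :
    ∀ (Q E p : List Int), entries01 Q →
      (Q.length + m.length ≤ p.length + 1 ∨ Q = []) →
      (PySem.List.enumerate Q (E.length : Int)).foldl
          (fun (fr : List Int) (sq : Int × Int) =>
            if sq.2 ≠ 0 then
              PySem.List.slice fr none (some sq.1) ++
              ((PySem.List.slice fr (some sq.1) (some (sq.1 + (m.length : Int)))).zip m).map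
                  (fun pr => PySem.Int.bxor pr.1 pr.2) ++
              PySem.List.slice fr (some (sq.1 + (m.length : Int))) none
            else fr)
          (E ++ p)
        = E ++ sched m Q p := by
  intro Q
  induction Q with
  | nil =>
    intro E p _ _
    simp [PySem.List.enumerate, sched]
  | cons q Q ih =>
    intro E p hQ01 hlen
    have hml : m.length ≤ p.length := by
      rcases hlen with h | h
      · simp at h; omega
      · simp at h
    have hpne : p ≠ [] := by
      intro h; subst h
      simp only [List.length_nil, Nat.le_zero] at hml
      exact hm (List.eq_nil_of_length_eq_zero hml)
    have hlen' : ∀ (p1 : List Int), p1.length = p.length →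
        (Q.length + m.length ≤ p1.tail.length + 1 ∨ Q = []) := by
      intro p1 h1
      rcases hlen with h | h
      · left; rw [List.length_tail, h1]; simp at h
        have := List.length_pos_of_ne_nil hpne; omega
      · simp at h
    rw [PySem.List.enumerate_cons, List.foldl_cons]
    have hcast : (E.length : Int) + (m.length : Int) = ((E.length + m.length : Nat) : Int) := by
      push_cast; ring
    rcases hQ01 q (by simp) with hq | hq
    · -- q = 0 : no write
      subst hq
      rw [if_neg (by simp)]
      obtain ⟨ph, pt, rfl⟩ := List.exists_cons_of_ne_nil hpne
      have hEp : E ++ ph :: pt = (E ++ [ph]) ++ pt := by simp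
      have hstart : (E.length : Int) + 1 = ((E ++ [ph]).length : Int) := by simp
      rw [hEp, hstart, ih (E ++ [ph]) pt (fun x hx => hQ01 x (by simp [hx]))
        (hlen' (ph :: pt) rfl)]
      rw [sched]
      simp
    · -- q = 1 : xor the window at the cursor
      subst hq
      rw [if_pos (by simp)]
      dsimp only
      have e0 : PySem.List.slice (E ++ p) none (some (E.length : Int)) = E := by
        rw [PySem.List.slice_to_natCast, List.take_left]
      have e1 : PySem.List.slice (E ++ p) (some (E.length : Int))
          (some ((E.length : Int) + (m.length : Int))) = p.take m.length := by
        rw [hcast, PySem.List.slice_natCast, List.drop_left]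
        congr 1; omega
      have e2 : PySem.List.slice (E ++ p) (some ((E.length : Int) + (m.length : Int))) none
          = p.drop m.length := by
        rw [hcast, PySem.List.slice_from_natCast, List.drop_append,
          List.drop_eq_nil_of_le (by omega)]
        simp only [List.nil_append]
        congr 1; omega
      rw [e0, e1, e2, mapZip_eq_zipWith, zipWith_take_left, List.append_assoc]
      have hEpx : E ++ (List.zipWith PySem.Int.bxor p m ++ p.drop m.length)
          = E ++ pxor2 m p := rfl
      rw [hEpx]
      have hp1len : (pxor2 m p).length = p.length := length_pxor2 hml
      have hp1ne : pxor2 m p ≠ [] := by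
        intro h
        rw [h] at hp1len
        exact hpne (List.eq_nil_of_length_eq_zero (by simpa using hp1len.symm))
      obtain ⟨ph, pt, hps⟩ := List.exists_cons_of_ne_nil hp1ne
      rw [hps]
      have hEp : E ++ ph :: pt = (E ++ [ph]) ++ pt := by simp
      have hstart : (E.length : Int) + 1 = ((E ++ [ph]).length : Int) := by simp
      rw [hEp, hstart, ih (E ++ [ph]) pt (fun x hx => hQ01 x (by simp [hx]))
        (hlen' (ph :: pt) (by rw [← hps, hp1len]))]
      rw [sched]
      rw [show ((1:Int) == 1) = true from rfl]
      simp only [if_pos, if_true, hps, List.headD_cons, List.tail_cons]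
      simp

theorem inner_fold (rb : List Int) (i : Int) :
    ∀ (S T E : List Int) (c : Int), S.length ≤ rb.length →
      i = (T.length : Int) + (rb.length : Int) - 1 →
      (PySem.List.pyRange ((rb.length : Int) - (S.length : Int)) (rb.length : Int) 1).foldl
          (fun (st2 : List Int × Int) (j : Int) =>
            if PySem.List.pyGetD rb ((rb.length : Int) - 1 - j) 0 == 1 then
              (PySem.List.pySetD st2.1 (i - j)
                  (PySem.Int.bxor (PySem.List.pyGetD st2.1 (i - j) 0)
                    (PySem.List.pyGetD rb ((rb.length : Int) - 1 - j) 0)),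
                st2.2 + 1)
            else st2)
          (T ++ S ++ E, c)
        = (T ++ (List.zipWith (fun x y => if y == 1 then PySem.Int.bxor x 1 else x) S
              (rb.take S.length)) ++ E,
           c + ((rb.take S.length).countP (fun x => x == 1) : Int)) := by
  intro S
  induction S using List.reverseRecOn with
  | nil =>
    intro T E c _ _
    rw [PySem.List.pyRange_one_eq_nil (by simp)]
    simp
  | append_singleton S0 x ih =>
    intro T E c hS hi
    have hlen : (S0 ++ [x]).length = S0.length + 1 := by simp
    rw [hlen]
    have hm : S0.length < rb.length := by rw [hlen] at hS; omega
    rw [PySem.List.pyRange_one_cons (by push_cast; omega), List.foldl_cons]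
    have hplus : (rb.length : Int) - ((S0.length + 1 : Nat) : Int) + 1
        = (rb.length : Int) - ((S0.length : Nat) : Int) := by push_cast; ring
    rw [hplus]
    have hj1 : (rb.length : Int) - 1 - ((rb.length : Int) - ((S0.length + 1 : Nat) : Int))
        = ((S0.length : Nat) : Int) := by push_cast; ring
    have hidx : i - ((rb.length : Int) - ((S0.length + 1 : Nat) : Int))
        = ((T.length + S0.length : Nat) : Int) := by rw [hi]; push_cast; ring
    have hsplit : T ++ (S0 ++ [x]) ++ E = (T ++ S0) ++ x :: E := by simp
    have hgetrb : PySem.List.pyGetD rb ((S0.length : Nat) : Int) 0 = rb[S0.length] := by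
      rw [PySem.List.pyGetD_natCast, List.getD_eq_getElem _ _ hm]
    have htake : rb.take (S0.length + 1) = rb.take S0.length ++ [rb[S0.length]] := by
      rw [List.take_add_one]; simp [List.getElem?_eq_getElem hm]
    have hlen0 : (rb.take S0.length).length = S0.length := by simp; omega
    have hgetx : PySem.List.pyGetD ((T ++ S0) ++ x :: E) ((T.length + S0.length : Nat) : Int) 0 = x := by
      rw [PySem.List.pyGetD_natCast]
      have h2 : T.length + S0.length = (T ++ S0).length := by simp
      rw [h2, List.getD_eq_getElem _ _ (by simp)]
      simp [List.getElem_append_right]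
    have hsetx : ∀ v, PySem.List.pySetD ((T ++ S0) ++ x :: E) ((T.length + S0.length : Nat) : Int) v
        = (T ++ S0) ++ v :: E := by
      intro v
      rw [PySem.List.pySetD_natCast]
      have h2 : T.length + S0.length = (T ++ S0).length := by simp
      rw [h2, List.set_append_right _ _ (le_refl _)]
      simp
    simp only [hsplit, hj1, hidx, hgetrb, hgetx]
    by_cases hx1 : rb[S0.length] = 1
    · rw [if_pos (by simp [hx1]), hsetx]
      have h3 : (T ++ S0) ++ (PySem.Int.bxor x rb[S0.length]) :: E
          = T ++ S0 ++ ((PySem.Int.bxor x 1) :: E) := by simp [hx1]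
      rw [h3, ih T ((PySem.Int.bxor x 1) :: E) (c + 1) (le_of_lt hm) hi]
      rw [htake, List.zipWith_append (h := by omega), Prod.mk.injEq]
      refine ⟨by simp [hx1, List.append_assoc], ?_⟩
      simp [List.countP_append, List.countP_cons, hx1]
      ring
    · rw [if_neg (by simp [hx1])]
      have h3 : (T ++ S0) ++ x :: E = T ++ S0 ++ (x :: E) := by simp
      rw [h3, ih T (x :: E) c (le_of_lt hm) hi]
      rw [htake, List.zipWith_append (h := by omega), Prod.mk.injEq]
      have h4 : (rb.take (S0.length+1)).countP (fun y => y == 1) = (rb.take S0.length).countP (fun y => y == 1) := by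
        rw [htake, List.countP_append]; simp [hx1]
      refine ⟨by simp [hx1, List.append_assoc], ?_⟩
      simp [h4]

theorem xorWindow_reverse (rb T S : List Int) (hS : S.length = rb.length) :
    xorWindow rb.reverse (S.reverse ++ T.reverse)
      = ((T ++ List.zipWith (fun x y => if y == 1 then PySem.Int.bxor x 1 else x) S rb)).reverse := by
  have h1 : (S.reverse ++ T.reverse).zip rb.reverse = S.reverse.zip rb.reverse := by
    conv_lhs => rw [← List.append_nil rb.reverse]
    rw [List.zip_append (by simp [hS])]; simp
  simp only [xorWindow, h1]
  rw [List.drop_left' (by simp [hS])]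
  rw [mapZip_eq_zipWith (fun x y => if y == 1 then PySem.Int.bxor x 1 else x), ← List.reverse_zipWith (by simp [hS])]
  simp

theorem take_one_more {rm : List Int} {n : Nat} (h : n < rm.length) :
    (rm.take (n + 1)).reverse = rm[n] :: (rm.take n).reverse := by
  rw [List.take_add_one]
  simp [List.getElem?_eq_getElem h]

theorem main_fold (rb : List Int) (hrb : rb ≠ []) :
    ∀ (n : Nat) (rm ret : List Int) (c : Int), n ≤ rm.length →
      (PySem.List.pyRange ((n : Int) - 1) ((rb.length : Int) - 2) (-1)).foldl
          (fun (st : List Int × List Int × Int) (i : Int) =>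
            if PySem.List.pyGetD st.1 i 0 == 1 then
              let st2 :=
                (PySem.List.pyRange 0 (rb.length : Int) 1).foldl
                  (fun (st2 : List Int × Int) (j : Int) =>
                    if PySem.List.pyGetD rb ((rb.length : Int) - 1 - j) 0 == 1 then
                      (PySem.List.pySetD st2.1 (i - j)
                          (PySem.Int.bxor (PySem.List.pyGetD st2.1 (i - j) 0)
                            (PySem.List.pyGetD rb ((rb.length : Int) - 1 - j) 0)),
                        st2.2 + 1)
                    else st2)
                  (st.1, st.2.2)
              (st2.1, st.2.1 ++ [(1 : Int)], st2.2)
            else (st.1, st.2.1 ++ [(0 : Int)], st.2.2))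
          (rm, ret, c)
        = ((divRec rb.reverse ((rm.take n).reverse)).2.reverse ++ rm.drop n,
           ret ++ (divRec rb.reverse ((rm.take n).reverse)).1,
           c + (rb.countP (fun x => x == 1) : Int) *
             (divRec rb.reverse ((rm.take n).reverse)).1.sum) := by
  have hlb := List.length_pos_of_ne_nil hrb
  intro n
  induction n with
  | zero =>
    intro rm ret c _
    rw [show ((0 : Nat) : Int) - 1 = -1 by norm_num]
    rw [PySem.List.pyRange_neg_one_eq_nil (by omega)]
    rw [divRec, dif_neg (by simp)]
    simp
  | succ n ih =>
    intro rm ret c h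
    have hn1 : n < rm.length := by omega
    rw [show ((n + 1 : Nat) : Int) - 1 = (n : Int) by push_cast; ring]
    by_cases hn : (rb.length : Int) - 1 ≤ (n : Int)
    · -- loop body runs at i = n
      rw [PySem.List.pyRange_neg_one_cons (by omega), List.foldl_cons]
      have hget : PySem.List.pyGetD rm ((n : Nat) : Int) 0 = rm[n] := by
        rw [PySem.List.pyGetD_natCast, List.getD_eq_getElem _ _ hn1]
      have hlbn : rb.length ≤ n + 1 := by omega
      have hrevcons := take_one_more hn1
      by_cases hx1 : rm[n] = 1
      · -- quotient bit 1
        set q := (n + 1) - rb.length with hqdef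
        set T := rm.take q with hT
        set S := (rm.drop q).take rb.length with hSdef
        set E := rm.drop (n + 1) with hE
        have hSlen : S.length = rb.length := by rw [hSdef]; simp; omega
        have hTlen : T.length = q := by rw [hT]; simp; omega
        have hTSE : rm = T ++ S ++ E := by
          rw [hT, hSdef, hE, List.append_assoc]
          rw [show rm.drop (n+1) = (rm.drop q).drop rb.length by rw [List.drop_drop]; congr 1; omega]
          rw [List.take_append_drop, List.take_append_drop]
        have hTS : rm.take (n + 1) = T ++ S := by
          rw [hT, hSdef, ← List.take_add]
          congr 1; omega
        have hin := inner_fold rb (n : Int) S T E c (le_of_eq hSlen)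
          (by rw [hTlen]; omega)
        rw [hSlen, sub_self, List.take_length, ← hTSE] at hin
        set Z := List.zipWith (fun x y => if y == 1 then PySem.Int.bxor x 1 else x) S rb with hZ
        have hZlen : Z.length = rb.length := by rw [hZ]; simp [hSlen]
        set rmI := T ++ Z ++ E with hrmI
        have hrmIlen : rmI.length = rm.length := by
          rw [hrmI]; conv_rhs => rw [hTSE]
          simp [hZlen, hSlen]
        have hnI : n < rmI.length := by omega
        have hTZlen : (T ++ Z).length = n + 1 := by simp [hTlen, hZlen]; omega
        have hItake : rmI.take (n + 1) = T ++ Z := by rw [hrmI]; exact List.take_left' hTZlen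
        have hIdrop : rmI.drop (n + 1) = E := by rw [hrmI]; exact List.drop_left' hTZlen
        have hw : xorWindow rb.reverse ((rm.take (n+1)).reverse) = (rmI.take (n+1)).reverse := by
          rw [hTS, hItake, List.reverse_append]
          exact xorWindow_reverse rb T S hSlen
        have hstep1 : divRec rb.reverse ((rm.take (n+1)).reverse)
            = (1 :: (divRec rb.reverse ((rmI.take n).reverse)).1,
               rmI[n] :: (divRec rb.reverse ((rmI.take n).reverse)).2) := by
          rw [divRec, dif_pos ⟨by simp [hrb], by simp; omega⟩]
          rw [if_pos (by rw [hrevcons]; simp [hx1])]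
          rw [hw, take_one_more hnI]
          simp
        simp only [hget, hx1]
        rw [if_pos (by simp)]
        rw [hin]
        rw [ih rmI (ret ++ [(1:Int)]) _ (by omega), hstep1]
        rw [Prod.mk.injEq, Prod.mk.injEq]
        refine ⟨?_, by simp, by simp; ring⟩
        rw [List.reverse_cons, List.append_assoc, List.singleton_append,
          List.drop_eq_getElem_cons hnI, hIdrop, hE]
      · -- quotient bit 0
        have hstep0 : divRec rb.reverse ((rm.take (n+1)).reverse)
            = (0 :: (divRec rb.reverse ((rm.take n).reverse)).1,
               rm[n] :: (divRec rb.reverse ((rm.take n).reverse)).2) := by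
          rw [divRec, dif_pos ⟨by simp [hrb], by simp; omega⟩]
          rw [if_neg (by rw [hrevcons]; simp [hx1])]
          rw [hrevcons]
          simp
        simp only [hget]
        rw [if_neg (by simp [hx1])]
        rw [ih rm (ret ++ [(0:Int)]) c (by omega), hstep0]
        rw [Prod.mk.injEq, Prod.mk.injEq]
        refine ⟨?_, by simp, by simp⟩
        rw [List.reverse_cons, List.append_assoc, List.singleton_append,
          List.drop_eq_getElem_cons hn1]
    · -- n + 1 ≤ rb.length - 1 : empty range, loop over
      rw [PySem.List.pyRange_neg_one_eq_nil (by omega)]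
      rw [divRec, dif_neg (by simp; omega)]
      simp

-- ===== VERDICT (by name: the statement is the Claim_ definition above) =====
theorem gf2_poly_div_count_spec : Claim_equal_gf2_poly_div_count := by
  intro a b _ hpre
  unfold Spec_gf2_poly_div_count gf2_poly_div_count gf2_poly_div_count_alt
  dsimp only
  rw [stripB_eq_stripZero a, stripB_eq_stripZero b]
  have hBne : stripZero b ≠ [] := by
    rw [Ne, stripZero_eq_nil_iff]
    intro hall
    obtain ⟨x, hx, hx0⟩ := hpre
    exact hx0 (hall x hx)
  set A' := stripZero a with hA'
  set B' := stripZero b with hB'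
  have hlb : 0 < B'.length := List.length_pos_of_ne_nil hBne
  set brev := B'.reverse with hbrevdef
  have hbrevne : brev ≠ [] := by simp [hbrevdef]; exact hBne
  set m := maskOf brev with hmdef
  have hm01 : entries01 m := entries01_maskOf brev
  have hmlen : m.length = B'.length := by simp [hmdef, maskOf, hbrevdef]
  have hmne : m ≠ [] := by
    intro h
    rw [h] at hmlen
    simp at hmlen
    omega
  set arev := A'.reverse with harevdef
  have harevlen : arev.length = A'.length := by simp [harevdef]
  set z := List.replicate A'.length (0 : Int) with hzdef
  have hz01 : entries01 z := by
    intro x hx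
    left
    exact List.eq_of_mem_replicate hx
  -- A's nested fold = eager long division
  have hmain := main_fold B' hBne A'.length A' [] 0 (le_refl _)
  rw [List.take_length, List.drop_length] at hmain
  rw [hmain]
  -- eager long division = online quotient + scheduled parities
  have hdiv := master brev hbrevne hm01 arev.length arev z (le_refl _) (by simp [hzdef, harevlen])
    hz01
  have hAFz : applyFull z arev = arev := by
    rw [hzdef, ← harevlen]
    exact applyFull_zeros arev
  rw [hAFz] at hdiv
  rw [← hmdef] at hdiv
  rw [hdiv]
  dsimp only
  set Q := onlQ m z arev with hQdef
  set P := sched m Q z with hPdef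
  -- B's quotient fold = online quotient
  have hmrev : (B'.map (fun c => if c == 1 then (1:Int) else 0)).reverse = m := by
    rw [hmdef, hbrevdef, maskOf, ← List.map_reverse]
  have hmtail : ((B'.map (fun c => if c == 1 then (1:Int) else 0)).dropLast).reverse = m.tail := by
    rw [← List.tail_reverse, hmrev]
  rw [hmtail]
  have hslice : PySem.List.slice A' (some ((B'.length : Int) - 1)) none
      = A'.drop (B'.length - 1) := by
    rw [show ((B'.length : Int) - 1) = ((B'.length - 1 : Nat) : Int) from by omega]
    exact PySem.List.slice_from_natCast A' (B'.length - 1)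
  rw [hslice, List.reverse_drop]
  have hlist : A'.length - (B'.length - 1) = arev.length - (m.length - 1) := by
    rw [harevlen, hmlen]
  rw [show A'.reverse = arev from rfl, hlist]
  have hQfold := bq_fold m hmne hm01 A'.length arev [] (by intro x hx; simp at hx)
    (by simp [harevlen])
  have hpend0 : pendR m (([] : List Int)).reverse A'.length = z := by
    rw [List.reverse_nil]; rfl
  rw [hpend0] at hQfold
  rw [show arev.take (arev.length - (m.length - 1))
      = List.take (arev.length - (m.length - 1)) arev from rfl] at hQfold ⊢
  rw [hQfold, List.nil_append]
  -- B's fr fold = scheduled parities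
  have hQ01 : entries01 Q := by rw [hQdef]; exact entries01_onlQ m arev.length arev z (le_refl _)
  have hQlen := length_onlQ m hmne arev.length arev z (le_refl _)
  rw [← hQdef] at hQlen
  have hcond : Q.length + m.length ≤ z.length + 1 ∨ Q = [] := by
    rcases hQlen with h | h
    · right; exact h
    · left; rw [hzdef]; simp [harevlen] at h ⊢; omega
  have hFfold := bf_fold m hmne hm01 Q [] z hQ01 hcond
  simp only [List.length_nil, Nat.cast_zero, List.nil_append] at hFfold
  rw [show ((B'.length : Int)) = ((m.length : Int)) from by rw [hmlen], hmrev]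
  rw [hFfold]
  -- assemble the three components
  have hPlen : P.length = A'.length := by
    rw [hPdef]
    rw [length_sched m hmne Q z hcond]
    simp [hzdef]
  have hP01 : entries01 P := by
    rw [hPdef]; exact entries01_sched m hm01 Q z hz01
  rw [Prod.mk.injEq, Prod.mk.injEq]
  refine ⟨by simp, ?_, ?_⟩
  · -- remainder
    rw [List.append_nil, stripB_eq_stripZero]
    congr 1
    rw [applyFull, List.reverse_zipWith (by rw [hPlen, harevlen])]
    rw [show arev.reverse = A' from by rw [harevdef, List.reverse_reverse]]
    rw [zipWith_flip_eq P.reverse A' (fun x hx => hP01 x (List.mem_reverse.mp hx))]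
  · -- count
    rw [PySem.List.sum_map_ite_one_zero (fun c => c == 1) B']
    ring
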